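-- pv_equiv track=rewrite | github.com/FA2022-CIS-I/PA1 | PROGRAMS/pointCloud.py | getIncrementIndex
-- ===== SOURCE A (Python) =====
-- def getIncrementIndex(frameInfo):
--     """
--       Helper function to obtain the indexes to increment by per frame
--         :param frameInfo: information particular to a frame, including the specifications of what is contained in a frame
--         :type frameInfo: [int]
--
--         :return: a list of numerical indexes to which to itterate over
--         :rtype: [int]
--     """
--     startPoints = []
--     start = 0
--     startPoints.append(0)
--     if type(frameInfo) == int:
--         startPoints.append(frameInfo)
--     else:
--         for index in frameInfo:
--             start = start + index
--             startPoints.append(start)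
--     return startPoints
-- ===== SOURCE B (Python) =====
-- def getIncrementIndex(frameInfo):
--     if type(frameInfo) == int:
--         return [0, frameInfo]
--     total = sum(frameInfo)
--     out = []
--     for x in reversed(frameInfo):
--         out.append(total)
--         total -= x
--     out.append(0)
--     out.reverse()
--     return out
-- ===== Notes on version B (the rewrite author's own statement) =====
-- stated objective: alternative
-- what changed: Replaces A's forward running-sum pass with a reverse construction: compute the total once, emit boundaries back-to-front by subtracting each element, then reverse.
import Mathlib
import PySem

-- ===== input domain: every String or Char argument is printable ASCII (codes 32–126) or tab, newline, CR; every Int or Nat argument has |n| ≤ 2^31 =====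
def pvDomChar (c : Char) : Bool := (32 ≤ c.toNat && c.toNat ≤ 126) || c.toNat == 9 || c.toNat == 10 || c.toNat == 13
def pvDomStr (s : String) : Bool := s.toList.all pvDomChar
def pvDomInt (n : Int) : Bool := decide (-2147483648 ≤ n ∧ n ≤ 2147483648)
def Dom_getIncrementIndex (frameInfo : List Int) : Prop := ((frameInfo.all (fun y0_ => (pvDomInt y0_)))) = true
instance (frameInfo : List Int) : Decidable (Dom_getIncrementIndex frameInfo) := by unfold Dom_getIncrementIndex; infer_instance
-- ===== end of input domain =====

-- B replaces A's forward running-sum accumulation with a reverse pass: compute the total once,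
-- then build the boundaries back-to-front by subtraction and reverse at the end (alternative decomposition, same cost).
-- The Python `type(frameInfo) == int` branch is unreachable under the List Int signature and is not ported.

-- ===== PORT A =====
-- A: startPoints = [0]; start = 0; for index in frameInfo: start += index; startPoints.append(start)
def getIncrementIndex (frameInfo : List Int) : List Int :=
  let st := frameInfo.foldl
    (fun (st : List Int × Int) index =>
      let start := st.2 + index
      (st.1 ++ [start], start))
    ([(0 : Int)], (0 : Int))
  st.1

-- ===== PORT B =====
-- B: total = sum(frameInfo); out = []; for x in reversed(frameInfo): out.append(total); total -= x
--    out.append(0); out.reverse(); return out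
def getIncrementIndex_alt (frameInfo : List Int) : List Int :=
  let total := frameInfo.sum
  let st := frameInfo.reverse.foldl
    (fun (st : List Int × Int) x => (st.1 ++ [st.2], st.2 - x))
    (([] : List Int), total)
  (st.1 ++ [(0 : Int)]).reverse

-- ===== PRECONDITION & SPEC =====
def Spec_getIncrementIndex (frameInfo : List Int) (out : List Int) : Prop := out = getIncrementIndex_alt frameInfo
instance (frameInfo : List Int) (out : List Int) : Decidable (Spec_getIncrementIndex frameInfo out) := by unfold Spec_getIncrementIndex; infer_instance

-- ===== CLAIM (what is proved, stated in full; the proofs are below) =====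
def Claim_equal_getIncrementIndex : Prop := ∀ (frameInfo : List Int), Dom_getIncrementIndex frameInfo → Spec_getIncrementIndex frameInfo (getIncrementIndex frameInfo)

-- ===== LEMMAS AND PROOFS =====

-- A's fold, from accumulator (acc, s), appends the running sums s + (take (i+1)).sum.
theorem foldA_eq (l : List Int) : ∀ (acc : List Int) (s : Int),
    (l.foldl (fun (st : List Int × Int) index => (st.1 ++ [st.2 + index], st.2 + index)) (acc, s)).1
      = acc ++ (List.range l.length).map (fun i => s + (l.take (i + 1)).sum) := by
  induction l with
  | nil => intro acc s; simp
  | cons x xs ih =>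
    intro acc s
    simp only [List.foldl_cons, List.length_cons, List.range_succ_eq_map, List.map_cons,
      List.map_map]
    rw [ih]
    simp [List.append_assoc, Function.comp, add_assoc]

-- B's fold, from accumulator (acc, s), appends the descending sums s - (take i).sum.
theorem foldB_eq (r : List Int) : ∀ (acc : List Int) (s : Int),
    r.foldl (fun (st : List Int × Int) x => (st.1 ++ [st.2], st.2 - x)) (acc, s)
      = (acc ++ (List.range r.length).map (fun i => s - (r.take i).sum), s - r.sum) := by
  induction r with
  | nil => intro acc s; simp
  | cons x xs ih =>
    intro acc s
    simp only [List.foldl_cons, List.length_cons, List.range_succ_eq_map, List.map_cons,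
      List.map_map]
    rw [ih]
    simp [Function.comp, List.sum_cons, sub_sub, List.append_assoc]

-- the total minus the sum of the last i elements is the sum of the first (length - i).
theorem sum_rev_take (l : List Int) (i : Nat) :
    l.sum - (l.reverse.take i).sum = (l.take (l.length - i)).sum := by
  rw [List.take_reverse, List.sum_reverse]
  have := List.sum_take_add_sum_drop l (l.length - i)
  omega

theorem rev_map_range (n : Nat) (g : Nat → Int) :
    ((List.range n).map (fun i => g (n - i))).reverse = (List.range n).map (fun i => g (i + 1)) := by
  apply List.ext_getElem
  · simp
  · intro i h1 h2
    simp only [List.getElem_reverse, List.length_map, List.length_range, List.getElem_map,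
      List.getElem_range]
    congr 1
    simp at h1
    omega

theorem getIncrementIndex_spec : Claim_equal_getIncrementIndex := by
  intro l _
  unfold Spec_getIncrementIndex getIncrementIndex getIncrementIndex_alt
  simp only []
  rw [foldB_eq]
  simp only [foldA_eq, List.length_reverse, List.nil_append, List.reverse_append,
    List.reverse_cons, List.reverse_nil, List.nil_append]
  have h1 : (List.range l.length).map (fun i => l.sum - (l.reverse.take i).sum)
      = (List.range l.length).map (fun i => (l.take (l.length - i)).sum) := by
    exact List.map_congr_left (fun i _ => sum_rev_take l i)
  rw [h1, rev_map_range l.length (fun j => (l.take j).sum)]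
  simp
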